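-- pv_equiv track=rewrite | github.com/sivabheri/DSA | Greedy/colorfulRope.py | solve
-- ===== SOURCE A (Python) =====
-- def solve(colors,timeNeeded):
-- 	'''let arr = a a a a-> 1 2 1 4 : neededTime
-- 	we compare 1st and 2nd,
-- 	we remove the smallest ie 1st , time += min(arr[0],arr[1])
-- 	we compare 2nd and 3rd  we remove 3rd, time += min(arr[1],arr[2])
-- 	we compare 2nd and 4th we remove 2nd, time += min(arr[1],arr[3])
-- 	So, from the above illustration we can observe that not only the minTime value but also the maxTime has to be stored
-- 	so, for every time colors[i-1]==colors[i],
-- 	we take prevMaxTime = max(cur,prevMaxTime)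
-- 	and we keep on updating the prevMaxTime along as colors[i-1]==colors[i], else we set it to 0'''
-- 	n = len(colors)
-- 	time = 0
-- 	prevMax = 0
-- 	for i in range(n):
-- 		if i>0 and colors[i-1]!=colors[i]:
-- 			prevMax = 0
-- 		cur = timeNeeded[i]
-- 		time += min(prevMax,cur)
-- 		prevMax = max(prevMax,cur)
-- 	return time
-- ===== SOURCE B (Python) =====
-- def solve(colors, timeNeeded):
--     # Run decomposition: each maximal run of equal colors contributes
--     # sum(run times) - max(0, max(run times)); accumulate over runs.
--     total = 0
--     i = 0
--     n = len(colors)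
--     while i < n:
--         run_sum = 0
--         run_max = 0
--         j = i
--         while j < n and colors[j] == colors[i]:
--             t = timeNeeded[j]
--             run_sum += t
--             if t > run_max:
--                 run_max = t
--             j += 1
--         total += run_sum - run_max
--         i = j
--     return total
-- ===== Notes on version B (the rewrite author's own statement) =====
-- stated objective: alternative
-- what changed: Replaces A's element-wise state machine (running prevMax, adding min(prevMax,cur) per element) by a run decomposition: carve maximal runs of equal colors and add sum(run) - max(0, max(run)) per run.
import Mathlib
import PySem

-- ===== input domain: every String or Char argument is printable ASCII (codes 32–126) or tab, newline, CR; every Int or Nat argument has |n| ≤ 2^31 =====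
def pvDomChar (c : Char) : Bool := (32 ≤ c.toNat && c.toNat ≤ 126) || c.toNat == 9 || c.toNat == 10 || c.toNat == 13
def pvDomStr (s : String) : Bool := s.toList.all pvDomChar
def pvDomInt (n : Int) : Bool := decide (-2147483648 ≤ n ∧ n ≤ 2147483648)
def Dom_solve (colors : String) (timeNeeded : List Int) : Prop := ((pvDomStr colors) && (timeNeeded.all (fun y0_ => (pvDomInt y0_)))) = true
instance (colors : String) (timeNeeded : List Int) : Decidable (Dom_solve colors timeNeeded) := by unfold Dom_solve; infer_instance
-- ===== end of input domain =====

-- B replaces A's element-wise prevMax state machine by a run decomposition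
-- (each maximal run of equal colors contributes sum(run) - max(0, max(run))); objective: alternative.

-- ===== PORT A =====
-- the 'for i in range(n)' loop of A, recursing over the remaining index list;
-- indices into colors are always in range; timeNeeded.getD's default is only
-- reached outside Pre_solve (where Python raises IndexError)
def solveGoA (cs : List Char) (ts : List Int) : List Nat → Int → Int → Int
  | [], time, _ => time
  | i :: rest, time, prevMax =>
      let pm : Int := if 0 < i ∧ cs.getD (i-1) ' ' ≠ cs.getD i ' ' then 0 else prevMax
      let cur : Int := ts.getD i 0
      solveGoA cs ts rest (time + min pm cur) (max pm cur)

def solve (colors : String) (timeNeeded : List Int) : Int :=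
  solveGoA colors.toList timeNeeded (List.range colors.toList.length) 0 0

-- ===== PORT B =====
-- B's outer while over runs / inner while over the run, as one scan that carries the
-- current run's color c0, its running sum s and running max-against-0 m, and adds
-- (s - m) to the total at each run boundary and at the end
def solveGoB : List Char → List Int → Char → Int → Int → Int → Int
  | [], _, _, s, m, tot => tot + (s - m)
  | c :: cs, ts, c0, s, m, tot =>
      let t : Int := ts.headD 0
      if c = c0 then
        solveGoB cs ts.tail c0 (s + t) (if m < t then t else m) tot
      else
        solveGoB cs ts.tail c t (if 0 < t then t else 0) (tot + (s - m))

def solve_alt (colors : String) (timeNeeded : List Int) : Int :=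
  match colors.toList with
  | [] => 0
  | c :: cs => solveGoB cs (timeNeeded.drop 1) c (timeNeeded.headD 0) (max 0 (timeNeeded.headD 0)) 0

-- ===== PRECONDITION & SPEC =====
-- Pre_solve excludes exactly the inputs on which A raises IndexError
-- (timeNeeded shorter than colors); B raises there too.
def Pre_solve (colors : String) (timeNeeded : List Int) : Prop :=
  colors.toList.length ≤ timeNeeded.length
instance (colors : String) (timeNeeded : List Int) : Decidable (Pre_solve colors timeNeeded) := by unfold Pre_solve; infer_instance

def pvWitness_solve : String × List Int := ("aab", [1, 2, 3])

def Spec_solve (colors : String) (timeNeeded : List Int) (out : Int) : Prop := out = solve_alt colors timeNeeded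
instance (colors : String) (timeNeeded : List Int) (out : Int) : Decidable (Spec_solve colors timeNeeded out) := by unfold Spec_solve; infer_instance

-- ===== CLAIM (what is proved, stated in full; the proofs are below) =====
def Claim_equal_solve : Prop := ∀ (colors : String) (timeNeeded : List Int), Dom_solve colors timeNeeded → Pre_solve colors timeNeeded → Spec_solve colors timeNeeded (solve colors timeNeeded)

-- ===== LEMMAS AND PROOFS =====

lemma getD_eq_headD_drop (l : List Int) (i : Nat) : l.getD i 0 = (l.drop i).headD 0 := by
  simp [List.getD, List.head?_drop]

lemma getD_char_drop (cs : List Char) (i : Nat) (c : Char) (rest : List Char)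
    (h : cs.drop i = c :: rest) : cs.getD i ' ' = c := by
  have := List.head?_drop (l := cs) (i := i)
  rw [h] at this
  simp [List.getD, ← this]

lemma key (suffix : List Char) : ∀ (cs : List Char) (ts : List Int) (i : Nat)
    (c0 : Char) (s m tot : Int), 1 ≤ i → cs.drop i = suffix → cs.getD (i-1) ' ' = c0 →
    solveGoA cs ts (List.range' i suffix.length) (tot + (s - m)) m
      = solveGoB suffix (ts.drop i) c0 s m tot := by
  induction suffix with
  | nil => intro cs ts i c0 s m tot _ _ _; simp [solveGoA, solveGoB]
  | cons c rest ih =>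
    intro cs ts i c0 s m tot hi hdrop hprev
    have hci : cs.getD i ' ' = c := getD_char_drop cs i c rest hdrop
    have hdrop' : cs.drop (i+1) = rest := by
      have := List.drop_drop (i := 1) (j := i) (l := cs)
      rw [hdrop] at this; simpa using this.symm
    have hprev' : cs.getD ((i+1)-1) ' ' = c := by simpa using hci
    have hts : ts.getD i 0 = (ts.drop i).headD 0 := getD_eq_headD_drop ts i
    have htail : (ts.drop i).tail = ts.drop (i+1) := by
      rw [List.tail_drop]
    simp only [List.length_cons]
    rw [List.range'_succ]
    simp only [solveGoA, solveGoB]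
    by_cases hc : c = c0
    · -- same run: A does not reset prevMax
      have hA : ¬ (0 < i ∧ cs.getD (i-1) ' ' ≠ cs.getD i ' ') := by
        rw [hprev, hci, hc]; simp
      rw [if_neg hA, if_pos hc, hts, htail]
      have harith : tot + (s - m) + min m ((ts.drop i).headD 0)
          = tot + (s + (ts.drop i).headD 0 - (if m < (ts.drop i).headD 0 then (ts.drop i).headD 0 else m)) := by
        rw [min_def]; split <;> split <;> omega
      have hmax : max m ((ts.drop i).headD 0) = (if m < (ts.drop i).headD 0 then (ts.drop i).headD 0 else m) := by
        rw [max_def]; split <;> split <;> omega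
      rw [harith, hmax]
      exact ih cs ts (i+1) c0 (s + (ts.drop i).headD 0) _ tot (by omega) hdrop' (by rw [hprev', hc])
    · -- run boundary: A resets prevMax to 0, B closes the run
      have hA : (0 < i ∧ cs.getD (i-1) ' ' ≠ cs.getD i ' ') := by
        refine ⟨hi, ?_⟩; rw [hprev, hci]; exact fun h => hc h.symm
      rw [if_pos hA, if_neg hc, hts, htail]
      have harith : tot + (s - m) + min 0 ((ts.drop i).headD 0)
          = (tot + (s - m)) + ((ts.drop i).headD 0 - (if 0 < (ts.drop i).headD 0 then (ts.drop i).headD 0 else 0)) := by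
        rw [min_def]; split <;> split <;> omega
      have hmax : max 0 ((ts.drop i).headD 0) = (if 0 < (ts.drop i).headD 0 then (ts.drop i).headD 0 else 0) := by
        rw [max_def]; split <;> split <;> omega
      rw [harith, hmax]
      exact ih cs ts (i+1) c ((ts.drop i).headD 0) _ (tot + (s - m)) (by omega) hdrop' hprev'

lemma solve_eq_alt (colors : String) (timeNeeded : List Int) :
    solve colors timeNeeded = solve_alt colors timeNeeded := by
  unfold solve solve_alt
  cases h : colors.toList with
  | nil => simp [solveGoA]
  | cons c cs =>
    show solveGoA (c :: cs) timeNeeded (List.range (c :: cs).length) 0 0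
      = solveGoB cs (timeNeeded.drop 1) c (timeNeeded.headD 0) (max 0 (timeNeeded.headD 0)) 0
    have hr : List.range (c :: cs).length = 0 :: List.range' 1 cs.length := by
      simp [List.range_eq_range', List.range'_succ]
    rw [hr]
    simp only [solveGoA]
    have h0 : ¬ (0 < 0 ∧ (c :: cs).getD (0-1) ' ' ≠ (c :: cs).getD 0 ' ') := by simp
    rw [if_neg h0]
    have hts : timeNeeded.getD 0 0 = timeNeeded.headD 0 := by
      cases timeNeeded <;> simp [List.getD]
    have := key cs (c :: cs) timeNeeded 1 c (timeNeeded.headD 0)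
        (max 0 (timeNeeded.headD 0)) 0 (by omega) (by simp) (by simp [List.getD])
    rw [hts, ← this]
    congr 1
    rw [min_def, max_def]
    split <;> omega

-- ===== VERDICT (by name: the statement is the Claim_ definition above) =====
theorem solve_spec : Claim_equal_solve := by
  intro colors timeNeeded _ _
  unfold Spec_solve
  exact solve_eq_alt colors timeNeeded
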